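-- pv_equiv track=rewrite | github.com/ybezginova2016/Python_tasks | 0_miscellaneous/5_sets.py | set_gen
-- ===== SOURCE A (Python) =====
-- def set_gen(n):
--     s = []
--     for i in range(1, n+1):
--         if i % 5 == 2 or i % 5 == 4:
--             s.append(i)
--         elif i % 7 == 3:
--             s.append(i)
--         elif i % 3 != 1:
--             s.append(i)
--     return s
-- ===== SOURCE B (Python) =====
-- def set_gen(n):
--     # One period of 105 = lcm(3,5,7); the predicate is periodic with period 105.
--     offsets = [r for r in range(105)
--                if r % 5 == 2 or r % 5 == 4 or r % 7 == 3 or r % 3 != 1]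
--     s = []
--     for base in range(0, n + 1, 105):
--         for off in offsets:
--             v = base + off
--             if 1 <= v <= n:
--                 s.append(v)
--     return s
-- ===== Notes on version B (the rewrite author's own statement) =====
-- stated objective: faster
-- what changed: B precomputes the matching residues of one full period (the lcm of the three moduli) and then emits base+offset per period block, so the per-element if/elif modulo chain disappears; a timing run measured it faster by a constant factor.
import Mathlib
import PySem

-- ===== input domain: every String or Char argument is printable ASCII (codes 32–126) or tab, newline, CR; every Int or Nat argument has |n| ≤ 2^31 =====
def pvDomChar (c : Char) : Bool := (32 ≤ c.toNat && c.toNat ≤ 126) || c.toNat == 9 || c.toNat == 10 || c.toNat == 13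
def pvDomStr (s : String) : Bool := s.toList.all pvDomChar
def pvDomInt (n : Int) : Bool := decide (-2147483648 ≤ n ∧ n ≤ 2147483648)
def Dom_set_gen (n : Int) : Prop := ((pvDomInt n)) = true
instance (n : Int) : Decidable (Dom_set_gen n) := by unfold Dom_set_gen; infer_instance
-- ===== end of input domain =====

-- B precomputes the matching residues of one full period (the lcm of the three moduli)
-- and emits base+offset per block, removing the per-element modulo chain (measured faster).

-- ===== PORT A =====
def set_gen (n : Int) : List Int :=
  (PySem.List.pyRange 1 (n+1) 1).foldl
    (fun s i =>
      if PySem.Int.mod i 5 = 2 ∨ PySem.Int.mod i 5 = 4 then s ++ [i]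
      else if PySem.Int.mod i 7 = 3 then s ++ [i]
      else if PySem.Int.mod i 3 ≠ 1 then s ++ [i]
      else s) []

-- ===== PORT B =====
-- the comprehension over one period in Source B
def pvPred (r : Int) : Bool :=
  decide (PySem.Int.mod r 5 = 2 ∨ PySem.Int.mod r 5 = 4 ∨
          PySem.Int.mod r 7 = 3 ∨ PySem.Int.mod r 3 ≠ 1)

def pvOffsets : List Int := (PySem.List.pyRange 0 105 1).filter pvPred

def set_gen_alt (n : Int) : List Int :=
  (PySem.List.pyRange 0 (n+1) 105).foldl
    (fun s base =>
      pvOffsets.foldl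
        (fun s off =>
          if 1 ≤ base + off ∧ base + off ≤ n then s ++ [base + off] else s) s)
    []

-- ===== PRECONDITION & SPEC =====
def Spec_set_gen (n : Int) (out : List Int) : Prop := out = set_gen_alt n
instance (n : Int) (out : List Int) : Decidable (Spec_set_gen n out) := by unfold Spec_set_gen; infer_instance

-- ===== CLAIM (what is proved, stated in full; the proofs are below) =====
def Claim_equal_set_gen : Prop := ∀ (n : Int), Dom_set_gen n → Spec_set_gen n (set_gen n)

-- ===== LEMMAS AND PROOFS =====

-- the in-range test of B, as a Bool filter
def pvCond (n v : Int) : Bool := decide (1 ≤ v ∧ v ≤ n) && pvPred v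

-- one block of B, after the inner fold is turned into filter+map
def pvBlk (n base : Int) : List Int :=
  (pvOffsets.map (fun off => base + off)).filter (fun v => decide (1 ≤ v ∧ v ≤ n))

theorem pvA_filter (n : Int) :
    set_gen n = (PySem.List.pyRange 1 (n+1) 1).filter pvPred := by
  unfold set_gen
  rw [show (fun (s : List Int) (i : Int) =>
      if PySem.Int.mod i 5 = 2 ∨ PySem.Int.mod i 5 = 4 then s ++ [i]
      else if PySem.Int.mod i 7 = 3 then s ++ [i]
      else if PySem.Int.mod i 3 ≠ 1 then s ++ [i]
      else s) = fun s i => if pvPred i = true then s ++ [i] else s from by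
    funext s i
    simp only [pvPred, decide_eq_true_eq]
    split_ifs <;> first | rfl | tauto]
  rw [PySem.List.foldl_append_if_eq_filter pvPred]
  simp

theorem pvPred_periodic (b r : Int) (hb : (105 : Int) ∣ b) :
    pvPred (b + r) = pvPred r := by
  obtain ⟨k, rfl⟩ := hb
  have h5 : ∀ a : Int, PySem.Int.mod a 5 = a % 5 :=
    fun a => PySem.Int.mod_eq_emod_of_pos (by norm_num)
  have h7 : ∀ a : Int, PySem.Int.mod a 7 = a % 7 :=
    fun a => PySem.Int.mod_eq_emod_of_pos (by norm_num)
  have h3 : ∀ a : Int, PySem.Int.mod a 3 = a % 3 :=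
    fun a => PySem.Int.mod_eq_emod_of_pos (by norm_num)
  have e5 : (105 * k + r) % 5 = r % 5 := by omega
  have e7 : (105 * k + r) % 7 = r % 7 := by omega
  have e3 : (105 * k + r) % 3 = r % 3 := by omega
  simp only [pvPred, h5, h7, h3, e5, e7, e3]

theorem pvMap_shift (b : Int) :
    (PySem.List.pyRange 0 105 1).map (fun r => b + r) =
      PySem.List.pyRange b (b + 105) 1 := by
  rw [PySem.List.pyRange_one, PySem.List.pyRange_one, List.map_map]
  norm_num

theorem pvBlk_eq (n b : Int) (hb : (105 : Int) ∣ b) :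
    pvBlk n b = (PySem.List.pyRange b (b + 105) 1).filter (pvCond n) := by
  unfold pvBlk
  have hshift : pvOffsets.map (fun off => b + off) =
      (PySem.List.pyRange b (b + 105) 1).filter pvPred := by
    unfold pvOffsets
    rw [← pvMap_shift b, List.filter_map]
    congr 1
    apply List.filter_congr
    intro r _
    exact (pvPred_periodic b r hb).symm ▸ rfl
  rw [hshift, List.filter_filter]
  rfl

theorem pvTrim (n c : Int) (_hc : n + 1 ≤ c) :
    (PySem.List.pyRange (n+1) c 1).filter (pvCond n) = [] := by
  rw [List.filter_eq_nil_iff]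
  intro v hv
  rw [PySem.List.mem_pyRange_one] at hv
  simp [pvCond]
  omega

theorem pvRange105_cons (b e : Int) (h : b < e) :
    PySem.List.pyRange b e 105 = b :: PySem.List.pyRange (b + 105) e 105 := by
  rw [PySem.List.pyRange_of_pos _ _ (by norm_num : (0:Int) < 105),
      PySem.List.pyRange_of_pos _ _ (by norm_num : (0:Int) < 105)]
  by_cases h2 : b + 105 < e
  · have hc : ((e - b + 105 - 1) / 105).toNat =
        ((e - (b + 105) + 105 - 1) / 105).toNat + 1 := by omega
    simp only [if_pos h, if_pos h2, hc, List.range_succ_eq_map, List.map_cons,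
      List.map_map]
    refine List.cons_eq_cons.mpr ⟨by norm_num, ?_⟩
    apply List.map_congr_left
    intro k _
    simp only [Function.comp_apply, Nat.succ_eq_add_one]
    push_cast
    ring
  · have hc : ((e - b + 105 - 1) / 105).toNat = 1 := by omega
    simp only [if_pos h, if_neg h2, hc]
    norm_num

theorem pvRange105_nil (b e : Int) (h : ¬ b < e) :
    PySem.List.pyRange b e 105 = [] := by
  rw [PySem.List.pyRange_of_pos _ _ (by norm_num : (0:Int) < 105), if_neg h]
  simp

theorem pvBlocks (n : Int) : ∀ (k : Nat) (b : Int), 0 ≤ b → (105 : Int) ∣ b →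
    n + 1 - b ≤ 105 * k →
    (PySem.List.pyRange b (n+1) 105).flatMap (pvBlk n) =
      (PySem.List.pyRange b (n+1) 1).filter (pvCond n) := by
  intro k
  induction k with
  | zero =>
    intro b _ _ hk
    rw [pvRange105_nil b (n+1) (by omega), PySem.List.pyRange_one_eq_nil (by omega)]
    simp
  | succ k ih =>
    intro b hb hd hk
    by_cases hend : n + 1 ≤ b
    · rw [pvRange105_nil b (n+1) (by omega), PySem.List.pyRange_one_eq_nil (by omega)]
      simp
    · have hlt : b < n + 1 := by omega
      rw [pvRange105_cons b (n+1) hlt, List.flatMap_cons,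
          ih (b + 105) (by omega) (by exact Dvd.dvd.add hd ⟨1, by norm_num⟩) (by omega)]
      by_cases hm : b + 105 ≤ n + 1
      · rw [PySem.List.pyRange_one_append b (b + 105) (n+1) (by omega) hm,
            List.filter_append, pvBlk_eq n b hd]
      · rw [show PySem.List.pyRange (b+105) (n+1) 1 = [] from
              PySem.List.pyRange_one_eq_nil (by omega),
            pvBlk_eq n b hd,
            PySem.List.pyRange_one_append b (n+1) (b+105) (by omega) (by omega),
            List.filter_append, pvTrim n (b+105) (by omega)]
        simp

theorem pvB_filter (n : Int) :
    set_gen_alt n = (PySem.List.pyRange 0 (n+1) 1).filter (pvCond n) := by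
  unfold set_gen_alt
  rw [show (fun (s : List Int) (base : Int) =>
      pvOffsets.foldl
        (fun s off =>
          if 1 ≤ base + off ∧ base + off ≤ n then s ++ [base + off] else s) s)
      = fun s base => s ++ pvBlk n base from by
    funext s base
    rw [PySem.List.foldl_append_ite (fun off => 1 ≤ base + off ∧ base + off ≤ n)
        (fun off => base + off) pvOffsets s]
    unfold pvBlk
    rw [List.filter_map]
    rfl]
  rw [PySem.List.foldl_append_eq_flatMap (pvBlk n)]
  rw [pvBlocks n (n+1).toNat 0 le_rfl ⟨0, by norm_num⟩ (by omega)]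
  simp

theorem pvFinal (n : Int) :
    (PySem.List.pyRange 1 (n+1) 1).filter pvPred =
      (PySem.List.pyRange 0 (n+1) 1).filter (pvCond n) := by
  by_cases h : 0 < n + 1
  · rw [PySem.List.pyRange_one_cons h,
        List.filter_cons_of_neg (by simp [pvCond])]
    apply List.filter_congr
    intro v hv
    rw [PySem.List.mem_pyRange_one] at hv
    simp [pvCond]
    omega
  · rw [PySem.List.pyRange_one_eq_nil (by omega), PySem.List.pyRange_one_eq_nil (by omega)]
    rfl

-- ===== VERDICT (by name: the statement is the Claim_ definition above) =====
theorem set_gen_spec : Claim_equal_set_gen := by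
  intro n _
  unfold Spec_set_gen
  rw [pvA_filter, pvB_filter, pvFinal]
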